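-- pv_equiv track=rewrite | github.com/sun7shines/Cloudfs | cloud/swift/common/AccountMeta.py | filter_prefix
-- ===== SOURCE A (Python) =====
-- def filter_prefix(objects, prefix):
--     """
--     Accept sorted list.
--     """
--     found = 0
--     filtered_objs = []
--     for object_name in objects:
--         if object_name.startswith(prefix):
--             filtered_objs.append(object_name)
--             found = 1
--         else:
--             if found:
--                 break
--     return filtered_objs
-- ===== SOURCE B (Python) =====
-- def filter_prefix(objects, prefix):
--     # two-pointer index scan: find start of first matching run, find its end, slice
--     n = len(objects)
--     i = 0
--     while i < n and not objects[i].startswith(prefix):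
--         i += 1
--     j = i
--     while j < n and objects[j].startswith(prefix):
--         j += 1
--     return objects[i:j]
-- ===== Notes on version B (the rewrite author's own statement) =====
-- stated objective: alternative
-- what changed: Replaces A's flag-and-break accumulator loop by a two-pointer index scan (one loop finds the start of the matching run, a second finds its end) followed by a single slice, with no found flag and no appends.
import Mathlib
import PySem

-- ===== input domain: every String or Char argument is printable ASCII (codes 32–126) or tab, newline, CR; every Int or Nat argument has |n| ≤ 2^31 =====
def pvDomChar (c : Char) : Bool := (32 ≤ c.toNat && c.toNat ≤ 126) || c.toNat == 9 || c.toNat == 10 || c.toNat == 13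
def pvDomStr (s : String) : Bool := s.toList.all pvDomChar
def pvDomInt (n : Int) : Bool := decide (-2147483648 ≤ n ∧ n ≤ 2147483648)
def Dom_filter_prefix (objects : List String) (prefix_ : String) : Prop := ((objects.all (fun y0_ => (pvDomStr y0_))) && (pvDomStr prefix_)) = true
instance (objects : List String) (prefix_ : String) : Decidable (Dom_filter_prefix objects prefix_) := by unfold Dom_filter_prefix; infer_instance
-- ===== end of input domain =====

-- B replaces A's flag-and-break accumulator loop by a two-pointer index scan (start and end of the matching run) and one slice.

-- ===== PORT A =====
-- loop state: found flag and accumulated list; 'break' returns the accumulator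
def filter_prefix_go (prefix_ : String) : List String → Bool → List String → List String
  | [], _, acc => acc
  | x :: xs, found, acc =>
    if PySem.Str.startswith x prefix_ then filter_prefix_go prefix_ xs true (acc ++ [x])
    else if found then acc else filter_prefix_go prefix_ xs found acc

def filter_prefix (objects : List String) (prefix_ : String) : List String :=
  filter_prefix_go prefix_ objects false []

-- ===== PORT B =====
-- first while loop of B: advance i past elements that do not start with prefix_
def filter_prefix_alt_find (objects : List String) (prefix_ : String) (i : Nat) : Nat :=
  if h : i < objects.length then
    if !(PySem.Str.startswith objects[i] prefix_) then filter_prefix_alt_find objects prefix_ (i + 1)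
    else i
  else i
termination_by objects.length - i

-- second while loop of B: advance j while elements start with prefix_
def filter_prefix_alt_end (objects : List String) (prefix_ : String) (j : Nat) : Nat :=
  if h : j < objects.length then
    if PySem.Str.startswith objects[j] prefix_ then filter_prefix_alt_end objects prefix_ (j + 1)
    else j
  else j
termination_by objects.length - j

def filter_prefix_alt (objects : List String) (prefix_ : String) : List String :=
  let i := filter_prefix_alt_find objects prefix_ 0
  let j := filter_prefix_alt_end objects prefix_ i
  PySem.List.slice objects (some (i : Int)) (some (j : Int))

-- ===== PRECONDITION & SPEC =====
def Spec_filter_prefix (objects : List String) (prefix_ : String) (out : List String) : Prop := out = filter_prefix_alt objects prefix_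
instance (objects : List String) (prefix_ : String) (out : List String) : Decidable (Spec_filter_prefix objects prefix_ out) := by unfold Spec_filter_prefix; infer_instance

-- ===== CLAIM (what is proved, stated in full; the proofs are below) =====
def Claim_equal_filter_prefix : Prop := ∀ (objects : List String) (prefix_ : String), Dom_filter_prefix objects prefix_ → Spec_filter_prefix objects prefix_ (filter_prefix objects prefix_)

-- ===== LEMMAS AND PROOFS =====
-- proof-only helpers: the canonical dropWhile(non-match)/takeWhile(match) shape both ports are reduced to
def pvDropNon (prefix_ : String) : List String → List String
  | [] => []
  | x :: xs => if !(PySem.Str.startswith x prefix_) then pvDropNon prefix_ xs else x :: xs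

def pvTakeMatch (prefix_ : String) : List String → List String
  | [] => []
  | x :: xs => if PySem.Str.startswith x prefix_ then x :: pvTakeMatch prefix_ xs else []

-- once found = true, A appends the run of matches onto acc and stops at the first non-match
theorem filter_prefix_go_true (prefix_ : String) (xs : List String) :
    ∀ acc, filter_prefix_go prefix_ xs true acc = acc ++ pvTakeMatch prefix_ xs := by
  induction xs with
  | nil => intro acc; simp [filter_prefix_go, pvTakeMatch]
  | cons x xs ih =>
    intro acc
    by_cases h : PySem.Str.startswith x prefix_ = true <;>
      simp only [PySem.Str.startswith] at h
    · simp [filter_prefix_go, pvTakeMatch, h, ih]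
    · simp [filter_prefix_go, pvTakeMatch, h]

theorem filter_prefix_go_false (prefix_ : String) (xs : List String) :
    filter_prefix_go prefix_ xs false [] = pvTakeMatch prefix_ (pvDropNon prefix_ xs) := by
  induction xs with
  | nil => simp [filter_prefix_go, pvDropNon, pvTakeMatch]
  | cons x xs ih =>
    by_cases h : PySem.Str.startswith x prefix_ = true <;>
      simp only [PySem.Str.startswith] at h
    · simp [filter_prefix_go, pvDropNon, pvTakeMatch, h, filter_prefix_go_true]
    · simp [filter_prefix_go, pvDropNon, h, ih]

-- the first while loop computes the index whose suffix is pvDropNon of the current suffix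
theorem filter_prefix_alt_find_drop (objects : List String) (prefix_ : String) :
    ∀ i, objects.drop (filter_prefix_alt_find objects prefix_ i) = pvDropNon prefix_ (objects.drop i) := by
  intro i
  fun_induction filter_prefix_alt_find objects prefix_ i with
  | case1 i h hm ih =>
    rw [ih, List.drop_eq_getElem_cons h]
    simp only [pvDropNon]
    rw [if_pos]
    simpa using hm
  | case2 i h hm =>
    rw [List.drop_eq_getElem_cons h]
    simp only [pvDropNon]
    rw [if_neg]
    simpa using hm
  | case3 i h =>
    rw [List.drop_eq_nil_of_le (by omega)]
    simp [pvDropNon]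

theorem filter_prefix_alt_end_ge (objects : List String) (prefix_ : String) :
    ∀ j, j ≤ filter_prefix_alt_end objects prefix_ j := by
  intro j
  fun_induction filter_prefix_alt_end objects prefix_ j with
  | case1 j h hm ih => omega
  | case2 j h hm => omega
  | case3 j h => omega

-- the second while loop's span is pvTakeMatch of the current suffix
theorem filter_prefix_alt_end_take (objects : List String) (prefix_ : String) :
    ∀ j, (objects.drop j).take (filter_prefix_alt_end objects prefix_ j - j) = pvTakeMatch prefix_ (objects.drop j) := by
  intro j
  fun_induction filter_prefix_alt_end objects prefix_ j with
  | case1 j h hm ih =>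
    have hge := filter_prefix_alt_end_ge objects prefix_ (j + 1)
    rw [List.drop_eq_getElem_cons h]
    have harith : filter_prefix_alt_end objects prefix_ (j + 1) - j
        = (filter_prefix_alt_end objects prefix_ (j + 1) - (j + 1)) + 1 := by omega
    rw [harith, List.take_succ_cons, ih]
    simp only [pvTakeMatch]
    rw [if_pos hm]
  | case2 j h hm =>
    rw [List.drop_eq_getElem_cons h]
    simp only [pvTakeMatch, Nat.sub_self, List.take_zero]
    rw [if_neg hm]
  | case3 j h =>
    rw [List.drop_eq_nil_of_le (by omega)]
    simp [pvTakeMatch]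

theorem filter_prefix_alt_eq (objects : List String) (prefix_ : String) :
    filter_prefix_alt objects prefix_ = pvTakeMatch prefix_ (pvDropNon prefix_ objects) := by
  unfold filter_prefix_alt
  rw [PySem.List.slice_natCast]
  have h0 := filter_prefix_alt_find_drop objects prefix_ 0
  simp only [List.drop_zero] at h0
  rw [← h0, filter_prefix_alt_end_take]

-- ===== VERDICT (by name: the statement is the Claim_ definition above) =====
theorem filter_prefix_spec : Claim_equal_filter_prefix := by
  intro objects prefix_ _
  unfold Spec_filter_prefix filter_prefix
  rw [filter_prefix_alt_eq, filter_prefix_go_false]
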